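-- pv_equiv track=rewrite | github.com/matheusfillipe/foobar | 3/divisors3_1.py | lucky_tripple_count
-- ===== SOURCE A (Python) =====
-- def lucky_tripple_count(numbers, numerator, recursion_level=0, root=False):
--     if recursion_level == 2:
--         return 1
--     count = 0
--     for i, denominator in enumerate(numbers):
--         if numerator % denominator == 0:
--             count += lucky_tripple_count(
--                 numbers[(i + 1) :], denominator, recursion_level + 1
--             )
--     return count
-- ===== SOURCE B (Python) =====
-- def lucky_tripple_count(numbers, numerator, recursion_level=0, root=False):
--     # Bottom-up DP: cur[j] = number of divisor chains of the current length
--     # starting at index j; iterate L-1 layers, then attach the numerator.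
--     L = 2 - recursion_level
--     if L < 0:
--         return 0
--     if L == 0:
--         return 1
--     if L > len(numbers):
--         return 0
--     cur = [1] * len(numbers)
--     for _ in range(L - 1):
--         cur = [_collect(numbers[j], numbers[j + 1:], cur[j + 1:])
--                for j in range(len(numbers))]
--     return _collect(numerator, numbers, cur)
--
--
-- def _collect(x, ys, cs):
--     s = 0
--     for y, c in zip(ys, cs):
--         if x % y == 0:
--             s += c
--     return s
-- ===== Notes on version B (the rewrite author's own statement) =====
-- stated objective: alternative
-- what changed: Replaces A's top-down recursion over list suffixes (which re-enumerates every divisor chain, slicing the list at each recursive call) with a bottom-up dynamic program: cur[j] counts divisor chains of the current length starting at index j, iterated L-1 = 1-recursion_level layers, then summed against the numerator.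
import Mathlib
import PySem

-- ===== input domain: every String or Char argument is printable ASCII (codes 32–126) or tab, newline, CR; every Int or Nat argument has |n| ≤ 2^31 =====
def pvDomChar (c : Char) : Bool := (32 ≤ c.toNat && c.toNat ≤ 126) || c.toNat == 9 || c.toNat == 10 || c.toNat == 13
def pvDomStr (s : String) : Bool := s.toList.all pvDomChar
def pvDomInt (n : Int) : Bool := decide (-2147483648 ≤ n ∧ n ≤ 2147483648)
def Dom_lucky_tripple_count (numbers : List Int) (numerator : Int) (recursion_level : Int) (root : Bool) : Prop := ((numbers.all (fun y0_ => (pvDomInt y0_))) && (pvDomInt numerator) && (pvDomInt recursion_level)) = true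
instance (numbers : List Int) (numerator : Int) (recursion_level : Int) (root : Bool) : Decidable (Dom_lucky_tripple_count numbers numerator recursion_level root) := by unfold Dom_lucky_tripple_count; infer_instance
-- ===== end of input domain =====

-- B replaces A's top-down recursion over list suffixes by a bottom-up DP over chain
-- length (alternative decomposition); equivalence of return values is proved below.

-- ===== PORT A =====
-- A's for-loop over enumerate(numbers) with recursive calls on numbers[(i+1):]
-- becomes the obvious suffix recursion ltcA_loop (mutual with the main function).
mutual
def lucky_tripple_count (numbers : List Int) (numerator : Int) (recursion_level : Int) (root : Bool) : Int :=
  if recursion_level = 2 then 1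
  else ltcA_loop numbers numerator recursion_level
  termination_by (numbers.length, 1)

def ltcA_loop : List Int → Int → Int → Int
  | [], _, _ => 0
  | d :: rest, q, rl =>
      (if PySem.Int.mod q d = 0 then lucky_tripple_count rest d (rl + 1) false else 0)
        + ltcA_loop rest q rl
  termination_by ns _ _ => (ns.length, 0)
end

-- ===== PORT B =====
-- port of _collect(x, ys, cs): the accumulator loop 's += c'
def ltcB_collect (x : Int) : List Int → List Int → Int → Int
  | y :: ys, c :: cs, s =>
      ltcB_collect x ys cs (if PySem.Int.mod x y = 0 then s + c else s)
  | _, _, s => s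

-- one DP layer: the comprehension [_collect(numbers[j], numbers[j+1:], cur[j+1:]) ...]
def ltcB_layer : List Int → List Int → List Int
  | y :: ys, _ :: cs => ltcB_collect y ys cs 0 :: ltcB_layer ys cs
  | _, _ => []

-- the 'for _ in range(L-1)' loop applying ltcB_layer to cur, starting from [1]*n
def ltcB_cnt : Nat → List Int → List Int
  | 0, ns => ns.map (fun _ => 1)
  | k + 1, ns => ltcB_layer ns (ltcB_cnt k ns)

def lucky_tripple_count_alt (numbers : List Int) (numerator : Int) (recursion_level : Int) (root : Bool) : Int :=
  let L := 2 - recursion_level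
  if L < 0 then 0
  else if L = 0 then 1
  else if L > (numbers.length : Int) then 0
  else ltcB_collect numerator numbers (ltcB_cnt (L - 1).toNat numbers) 0

-- ===== PRECONDITION & SPEC =====
-- Pre_ excludes exactly the inputs where Python A raises ZeroDivisionError:
-- when recursion_level ≠ 2 the loop computes numerator % d for every element d.
def Pre_lucky_tripple_count (numbers : List Int) (numerator : Int) (recursion_level : Int) (root : Bool) : Prop :=
  recursion_level = 2 ∨ ¬ (0 ∈ numbers)
instance (numbers : List Int) (numerator : Int) (recursion_level : Int) (root : Bool) : Decidable (Pre_lucky_tripple_count numbers numerator recursion_level root) := by unfold Pre_lucky_tripple_count; infer_instance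

def pvWitness_lucky_tripple_count : List Int × Int × Int × Bool := ([1, 2, 4, 12], 12, 0, false)

def Spec_lucky_tripple_count (numbers : List Int) (numerator : Int) (recursion_level : Int) (root : Bool) (out : Int) : Prop := out = lucky_tripple_count_alt numbers numerator recursion_level root
instance (numbers : List Int) (numerator : Int) (recursion_level : Int) (root : Bool) (out : Int) : Decidable (Spec_lucky_tripple_count numbers numerator recursion_level root out) := by unfold Spec_lucky_tripple_count; infer_instance

-- ===== CLAIM (what is proved, stated in full; the proofs are below) =====
def Claim_equal_lucky_tripple_count : Prop := ∀ (numbers : List Int) (numerator : Int) (recursion_level : Int) (root : Bool), Dom_lucky_tripple_count numbers numerator recursion_level root → Pre_lucky_tripple_count numbers numerator recursion_level root → Spec_lucky_tripple_count numbers numerator recursion_level root (lucky_tripple_count numbers numerator recursion_level root)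

-- ===== LEMMAS AND PROOFS =====

theorem ltcB_collect_acc (x : Int) : ∀ (ys cs : List Int) (s : Int),
    ltcB_collect x ys cs s = s + ltcB_collect x ys cs 0 := by
  intro ys
  induction ys with
  | nil => intro cs s; cases cs <;> simp [ltcB_collect]
  | cons y ys ih =>
    intro cs s
    cases cs with
    | nil => simp [ltcB_collect]
    | cons c cs =>
      simp only [ltcB_collect]
      rw [ih _ (if PySem.Int.mod x y = 0 then s + c else s),
          ih _ (if PySem.Int.mod x y = 0 then 0 + c else 0)]
      split_ifs <;> ring

theorem ltcA_loop_gt_two : ∀ (ns : List Int) (q rl : Int), 2 < rl → ltcA_loop ns q rl = 0 := by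
  intro ns
  induction ns with
  | nil => intro q rl _; simp [ltcA_loop]
  | cons d rest ih =>
    intro q rl h
    rw [ltcA_loop, lucky_tripple_count, if_neg (by omega : ¬ rl + 1 = 2),
        ih d (rl + 1) (by omega), ih q rl h]
    simp

-- head value of ltcB_cnt on a cons
def ltcB_head : Nat → Int → List Int → Int
  | 0, _, _ => 1
  | k + 1, d, rest => ltcB_collect d rest (ltcB_cnt k rest) 0

theorem ltcB_cnt_cons : ∀ (k : Nat) (d : Int) (rest : List Int),
    ltcB_cnt k (d :: rest) = ltcB_head k d rest :: ltcB_cnt k rest := by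
  intro k
  induction k with
  | zero => intro d rest; simp [ltcB_cnt, ltcB_head]
  | succ k ih =>
    intro d rest
    simp only [ltcB_cnt, ltcB_head]
    rw [ih]
    simp [ltcB_layer]

theorem ltcB_cnt_nil : ∀ (k : Nat), ltcB_cnt k [] = [] := by
  intro k; induction k with
  | zero => simp [ltcB_cnt]
  | succ k ih => simp [ltcB_cnt, ltcB_layer]

theorem main_chain : ∀ (k : Nat) (ns : List Int) (q : Int),
    ltcA_loop ns q (1 - (k : Int)) = ltcB_collect q ns (ltcB_cnt k ns) 0 := by
  intro k
  induction k with
  | zero =>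
    intro ns
    induction ns with
    | nil => intro q; simp [ltcA_loop, ltcB_collect]
    | cons d rest ih =>
      intro q
      rw [ltcA_loop, ltcB_cnt_cons, ltcB_collect, ltcB_collect_acc, ← ih q]
      congr 1
      split_ifs with h
      · have h2 : (1 : Int) - ((0 : Nat) : Int) + 1 = 2 := by norm_num
        rw [lucky_tripple_count, if_pos h2]
        simp [ltcB_head]
      · rfl
  | succ k ihk =>
    intro ns
    induction ns with
    | nil => intro q; simp [ltcA_loop, ltcB_collect]
    | cons d rest ih =>
      intro q
      have hne : ¬ ((1 : Int) - ((k + 1 : Nat) : Int) + 1 = 2) := by push_cast; omega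
      have harg : (1 : Int) - ((k + 1 : Nat) : Int) + 1 = 1 - (k : Int) := by push_cast; ring
      rw [ltcA_loop, ltcB_cnt_cons, ltcB_collect, ltcB_collect_acc, ← ih q]
      congr 1
      split_ifs with h
      · rw [lucky_tripple_count, if_neg hne, harg, ihk rest d]
        simp [ltcB_head]
      · rfl

theorem ltcB_collect_zeros (x : Int) : ∀ (ys : List Int),
    ltcB_collect x ys (ys.map (fun _ => 0)) 0 = 0 := by
  intro ys
  induction ys with
  | nil => simp [ltcB_collect]
  | cons y ys ih =>
    simp only [List.map_cons, ltcB_collect]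
    have h0 : (if PySem.Int.mod x y = 0 then (0:Int) + 0 else 0) = 0 := by
      split_ifs <;> ring
    rw [h0]; exact ih

theorem ltcB_cnt_long : ∀ (ns : List Int) (k : Nat), ns.length ≤ k →
    ltcB_cnt k ns = ns.map (fun _ => 0) := by
  intro ns
  induction ns with
  | nil => intro k _; simp [ltcB_cnt_nil]
  | cons d rest ih =>
    intro k hk
    cases k with
    | zero => simp at hk
    | succ k =>
      rw [ltcB_cnt_cons]
      simp only [ltcB_head, List.map_cons]
      have h1 : rest.length ≤ k := by simp at hk; omega
      have h2 : rest.length ≤ k + 1 := by omega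
      rw [ih k h1, ih (k + 1) h2, ltcB_collect_zeros]

-- ===== VERDICT (by name: the statement is the Claim_ definition above) =====
theorem lucky_tripple_count_spec : Claim_equal_lucky_tripple_count := by
  intro ns q rl root _ _
  unfold Spec_lucky_tripple_count lucky_tripple_count_alt
  simp only []
  rcases lt_trichotomy rl 2 with hlt | heq | hgt
  · -- rl < 2 : L = 2 - rl ≥ 1
    have hL0 : ¬ (2 - rl < 0) := by omega
    have hL1 : ¬ (2 - rl = 0) := by omega
    rw [if_neg hL0, if_neg hL1]
    set k : Nat := (2 - rl - 1).toNat with hk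
    have hcast : ((k : Int)) = 1 - rl := by omega
    have hrl : (1 : Int) - (k : Int) = rl := by omega
    have hA : lucky_tripple_count ns q rl root = ltcA_loop ns q rl := by
      rw [lucky_tripple_count, if_neg (by omega)]
    have hmc : ltcA_loop ns q rl = ltcB_collect q ns (ltcB_cnt k ns) 0 := by
      rw [← hrl]; exact main_chain k ns q
    rw [hA, hmc]
    by_cases hlen : 2 - rl > (ns.length : Int)
    · rw [if_pos hlen, ltcB_cnt_long ns k (by omega), ltcB_collect_zeros]
    · rw [if_neg hlen]
  · subst heq
    rw [lucky_tripple_count, if_pos rfl]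
    norm_num
  · have h0 : 2 - rl < 0 := by omega
    rw [if_pos h0, lucky_tripple_count, if_neg (by omega), ltcA_loop_gt_two ns q rl hgt]
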